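-- pv_equiv track=rewrite | github.com/luyanez/SoftwareEngineerInterviewCode | Code/Array_Strings/Prefix_sum/way_to_split_array.py | way_to_split_array
-- ===== SOURCE A (Python) =====
-- def way_to_split_array(nums):
--     prefix = [nums[0]]
--
--     for i in range(1,len(nums)):
--         prefix.append(nums[i] + prefix[-1])
--
--     ans = 0
--     for i in range(len(nums) - 1):
--         left_section = prefix[i]
--         right_section = prefix[-1] - prefix[i]
--         if left_section >= right_section:
--             ans += 1
--     return ans
-- ===== SOURCE B (Python) =====
-- def way_to_split_array(nums):
--     total = sum(nums)
--     left = 0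
--     ans = 0
--     for x in nums[:-1]:
--         left += x
--         if left >= total - left:
--             ans += 1
--     return ans
-- ===== Notes on version B (the rewrite author's own statement) =====
-- stated objective: simpler
-- what changed: Drops A's prefix-sum table and its two separate loops: B computes the total once and does a single pass with a running left-sum accumulator, O(1) extra space.
import Mathlib
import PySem

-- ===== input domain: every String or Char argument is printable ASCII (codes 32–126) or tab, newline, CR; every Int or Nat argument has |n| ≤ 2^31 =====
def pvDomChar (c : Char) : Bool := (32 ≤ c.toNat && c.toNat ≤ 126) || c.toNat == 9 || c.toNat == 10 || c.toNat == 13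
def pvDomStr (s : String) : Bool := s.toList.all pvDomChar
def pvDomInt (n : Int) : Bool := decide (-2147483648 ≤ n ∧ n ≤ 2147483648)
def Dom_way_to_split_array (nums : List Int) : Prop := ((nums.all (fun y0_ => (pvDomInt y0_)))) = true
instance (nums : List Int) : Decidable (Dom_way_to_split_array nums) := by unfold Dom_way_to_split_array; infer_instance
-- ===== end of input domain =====

-- B replaces A's prefix-sum table and two loops by one pass with a running left-sum (simpler, O(1) extra space); same return values wherever A returns.

-- ===== PORT A =====
def way_to_split_array (nums : List Int) : Int :=
  let pfx := (PySem.List.pyRange 1 (nums.length : Int)).foldl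
      (fun p i => p ++ [PySem.List.pyGetD nums i 0 + PySem.List.pyGetD p (-1) 0])
      [PySem.List.pyGetD nums 0 0]
  (PySem.List.pyRange 0 ((nums.length : Int) - 1)).foldl
      (fun ans i =>
        let ls := PySem.List.pyGetD pfx i 0
        let rs := PySem.List.pyGetD pfx (-1) 0 - ls
        if ls ≥ rs then ans + 1 else ans) 0

-- ===== PORT B =====
def way_to_split_array_alt (nums : List Int) : Int :=
  let total := nums.sum
  ((PySem.List.slice nums none (some (-1))).foldl
      (fun st x =>
        let left := st.1 + x
        (left, if left ≥ total - left then st.2 + 1 else st.2))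
      ((0 : Int), (0 : Int))).2

-- ===== PRECONDITION & SPEC =====
-- Pre_ excludes only the empty list, on which A raises IndexError at its first-element access.
def Pre_way_to_split_array (nums : List Int) : Prop := nums ≠ []
instance (nums : List Int) : Decidable (Pre_way_to_split_array nums) := by unfold Pre_way_to_split_array; infer_instance
def pvWitness_way_to_split_array : List Int := [10, -1, 3]

def Spec_way_to_split_array (nums : List Int) (out : Int) : Prop := out = way_to_split_array_alt nums
instance (nums : List Int) (out : Int) : Decidable (Spec_way_to_split_array nums out) := by unfold Spec_way_to_split_array; infer_instance

-- ===== CLAIM (what is proved, stated in full; the proofs are below) =====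
def Claim_equal_way_to_split_array : Prop := ∀ (nums : List Int), Dom_way_to_split_array nums → Pre_way_to_split_array nums → Spec_way_to_split_array nums (way_to_split_array nums)

-- ===== LEMMAS AND PROOFS =====

def pvPS (nums : List Int) (k : Nat) : Int := (nums.take (k+1)).sum
lemma prefix_build (nums : List Int) (j : Nat) (hj : j + 1 ≤ nums.length) :
    (PySem.List.pyRange 1 ((j+1 : Nat) : Int)).foldl
      (fun p i => p ++ [PySem.List.pyGetD nums i 0 + PySem.List.pyGetD p (-1) 0])
      [PySem.List.pyGetD nums 0 0]
    = (List.range (j+1)).map (pvPS nums) := by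
  induction j with
  | zero =>
      have : PySem.List.pyRange 1 ((1:Nat):Int) = [] := by decide
      rw [Nat.cast_one] at this ⊢
      rw [this]
      cases nums with
      | nil => simp at hj
      | cons h t => simp [pvPS, PySem.List.pyGetD_zero_cons]
  | succ j ih =>
      have hj' : j + 1 ≤ nums.length := by omega
      have hcast : ((j+1+1 : Nat) : Int) = ((j+1 : Nat) : Int) + 1 := by omega
      rw [hcast, PySem.List.pyRange_one_succ_right (by push_cast; omega), List.foldl_append, ih hj']
      simp only [List.foldl_cons, List.foldl_nil]
      rw [List.range_succ, List.map_append, List.map_singleton,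
        PySem.List.pyGetD_neg_one_append_singleton]
      rw [PySem.List.pyGetD_natCast, List.getD_eq_getElem _ _ (by omega)]
      have hv : nums[j + 1] + pvPS nums j = pvPS nums (j+1) := by
        show nums[j + 1] + (List.take (j+1) nums).sum = (List.take ((j+1)+1) nums).sum
        rw [List.take_add_one (i := j+1), List.getElem?_eq_getElem (show j+1 < nums.length by omega)]
        simp only [Option.toList_some, List.sum_append, List.sum_cons, List.sum_nil]
        omega
      rw [List.range_succ, List.range_succ, List.map_append,
        List.map_append, List.map_singleton, List.map_singleton]
      congr 1
      congr 1

lemma B_fold (total : Int) (l : List Int) : ∀ (left ans : Int),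
    (l.foldl (fun st x =>
        (st.1 + x, if st.1 + x ≥ total - (st.1 + x) then st.2 + 1 else st.2))
      (left, ans)).2
    = ans + ((List.range l.length).countP
        (fun k => decide (left + (l.take (k+1)).sum ≥ total - (left + (l.take (k+1)).sum))) : Int) := by
  induction l with
  | nil => intro left ans; simp
  | cons x t ih =>
      intro left ans
      simp only [List.foldl_cons, List.length_cons, List.range_succ_eq_map, List.countP_cons,
        List.countP_map]
      rw [ih]
      have hpred : (fun k : Nat => decide (left + x + (t.take (k+1)).sum ≥ total - (left + x + (t.take (k+1)).sum)))
          = ((fun k : Nat => decide (left + ((x :: t).take (k+1)).sum ≥ total - (left + ((x :: t).take (k+1)).sum))) ∘ (· + 1)) := by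
        funext k
        simp only [Function.comp, List.take_succ_cons, List.sum_cons]
        congr 2 <;> ring_nf
      rw [hpred]
      have h0 : (left + ((x :: t).take (0+1)).sum ≥ total - (left + ((x :: t).take (0+1)).sum))
          ↔ (left + x ≥ total - (left + x)) := by norm_num
      by_cases hc : left + x ≥ total - (left + x)
      · simp only [if_pos hc, if_pos (h0.mpr hc), decide_eq_true_eq]
        push_cast; ring
      · simp only [if_neg hc, if_neg (fun h => hc (h0.mp h)), decide_eq_true_eq]
        push_cast; ring

lemma take_pfx (nums : List Int) (j : Nat) (hj : nums.length = j + 1) :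
    pvPS nums j = nums.sum := by
  simp only [pvPS, ← hj, List.take_length]

lemma A_eq_count (nums : List Int) (h : nums ≠ []) :
    way_to_split_array nums
    = ((List.range (nums.length - 1)).countP
        (fun k => decide (pvPS nums k ≥ nums.sum - pvPS nums k)) : Int) := by
  obtain ⟨j, hj⟩ : ∃ j, nums.length = j + 1 := by
    cases nums with
    | nil => exact absurd rfl h
    | cons a t => exact ⟨t.length, rfl⟩
  simp only [way_to_split_array, hj]
  rw [prefix_build nums j (by omega)]
  have hcast : ((j+1 : Nat) : Int) - 1 = (j : Int) := by push_cast; ring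
  rw [hcast, PySem.List.pyRange_zero_natCast, List.foldl_map]
  have hlast : PySem.List.pyGetD ((List.range (j+1)).map (pvPS nums)) (-1) 0 = nums.sum := by
    rw [List.range_succ, List.map_append, List.map_singleton,
      PySem.List.pyGetD_neg_one_append_singleton, take_pfx nums j hj]
  have hget : ∀ k : Nat, k < j →
      PySem.List.pyGetD ((List.range (j+1)).map (pvPS nums)) ((k : Nat) : Int) 0 = pvPS nums k := by
    intro k hk
    rw [PySem.List.pyGetD_natCast]
    rw [List.getD_eq_getElem _ _ (by simp; omega)]
    simp
  refine Eq.trans (PySem.List.foldl_congr_mem (List.range j) _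
    (fun ans k => if pvPS nums k ≥ nums.sum - pvPS nums k then ans + 1 else ans) 0
    (fun acc k hk => by
      simp only [hget k (List.mem_range.mp hk), hlast])) ?_
  rw [PySem.List.foldl_ite_add_one (fun k => pvPS nums k ≥ nums.sum - pvPS nums k)]
  simp

lemma B_eq_count (nums : List Int) :
    way_to_split_array_alt nums
    = ((List.range (nums.length - 1)).countP
        (fun k => decide (pvPS nums k ≥ nums.sum - pvPS nums k)) : Int) := by
  simp only [way_to_split_array_alt, PySem.List.slice_to_neg_one]
  rw [B_fold nums.sum nums.dropLast 0 0]
  rw [List.length_dropLast]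
  have hc : (List.range (nums.length-1)).countP
        (fun k => decide (0 + (nums.dropLast.take (k+1)).sum ≥ nums.sum - (0 + (nums.dropLast.take (k+1)).sum)))
      = (List.range (nums.length-1)).countP
        (fun k => decide (pvPS nums k ≥ nums.sum - pvPS nums k)) := by
    refine List.countP_congr (fun k hk => ?_)
    have hk' : k < nums.length - 1 := List.mem_range.mp hk
    have htake : nums.dropLast.take (k+1) = nums.take (k+1) := by
      rw [List.dropLast_eq_take, List.take_take]
      congr 1
      omega
    rw [htake]
    simp [pvPS]
  rw [hc]
  simp

-- ===== VERDICT (by name: the statement is the Claim_ definition above) =====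
theorem way_to_split_array_spec : Claim_equal_way_to_split_array := by
  intro nums _ hpre
  unfold Spec_way_to_split_array
  rw [A_eq_count nums hpre, B_eq_count nums]
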